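-- pv_equiv track=rewrite | github.com/dannyalaska/dawn | app/core/excel/summary.py | _relationship_hint
-- ===== SOURCE A (Python) =====
-- def _relationship_hint(col_name: str, dtype: str) -> str | None:
--     name = col_name.lower()
--     if "assigned" in name or "resolver" in name or "owner" in name:
--         return "resolver"
--     if "agent" in name or "handler" in name:
--         return "agent"
--     if "category" in name or "type" in name:
--         return "category"
--     if "status" in name or "state" in name:
--         return "status"
--     if dtype.startswith("float") or dtype.startswith("int"):
--         if any(key in name for key in ["time", "hour", "duration", "days", "age"]):
--             return "duration"
--         if any(key in name for key in ["cost", "price", "amount", "revenue"]):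
--             return "cost"
--         if any(key in name for key in ["count", "num", "tickets"]):
--             return "count"
--     return None
-- ===== SOURCE B (Python) =====
-- # label, keywords, requires numeric dtype -- in priority order
-- _RULES = [
--     ("resolver", ("assigned", "resolver", "owner"), False),
--     ("agent", ("agent", "handler"), False),
--     ("category", ("category", "type"), False),
--     ("status", ("status", "state"), False),
--     ("duration", ("time", "hour", "duration", "days", "age"), True),
--     ("cost", ("cost", "price", "amount", "revenue"), True),
--     ("count", ("count", "num", "tickets"), True),
-- ]
--
-- # keywords bucketed by their first character, as (keyword, priority) pairs
-- _BY_FIRST = {}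
-- for _pr, (_label, _kws, _need) in enumerate(_RULES):
--     for _kw in _kws:
--         _BY_FIRST.setdefault(_kw[0], []).append((_kw, _pr))
--
--
-- def _relationship_hint(col_name: str, dtype: str) -> str | None:
--     # Single left-to-right scan of the name: at each position, try only the
--     # keywords starting with that character, keeping the best (lowest)
--     # priority matched anywhere; apply the numeric gate once at the end.
--     name = col_name.lower()
--     nrules = len(_RULES)
--     best = nrules
--     for i, ch in enumerate(name):
--         for kw, pr in _BY_FIRST.get(ch, ()):
--             if pr < best and name.startswith(kw, i):
--                 best = pr
--     if best == nrules:
--         return None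
--     label, _, needs_numeric = _RULES[best]
--     if needs_numeric and not (dtype.startswith("float") or dtype.startswith("int")):
--         return None
--     return label
-- ===== Notes on version B (the rewrite author's own statement) =====
-- stated objective: alternative
-- what changed: Instead of A's ordered chain of per-rule substring tests with early return, B makes a single left-to-right scan over the positions of the lowercased name, dispatching on the current character into a precomputed first-character bucket of (keyword, priority) pairs, maintaining the minimum matched priority, and applying the numeric-dtype gate once at the end via the selected rule's flag.
import Mathlib
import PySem

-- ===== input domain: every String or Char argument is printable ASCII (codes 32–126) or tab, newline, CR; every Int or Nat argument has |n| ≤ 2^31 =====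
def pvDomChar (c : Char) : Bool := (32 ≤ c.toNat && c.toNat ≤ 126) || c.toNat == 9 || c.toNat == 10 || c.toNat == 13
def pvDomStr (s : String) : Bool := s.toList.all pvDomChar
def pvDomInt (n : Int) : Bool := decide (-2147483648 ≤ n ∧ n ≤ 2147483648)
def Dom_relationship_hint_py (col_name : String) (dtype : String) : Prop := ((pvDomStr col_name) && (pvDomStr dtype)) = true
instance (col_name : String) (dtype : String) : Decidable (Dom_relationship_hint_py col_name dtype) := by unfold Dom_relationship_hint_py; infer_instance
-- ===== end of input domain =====

-- B replaces A's ordered if-chain of substring tests by a single scan over the name's positions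
-- that dispatches on the current character into first-character keyword buckets, keeps the minimum
-- matched rule priority, and applies the numeric-dtype gate once at the end (alternative; return value only).


-- ===== PORT A =====
def relationship_hint_py (col_name : String) (dtype : String) : Option String :=
  let name := PySem.Str.lower col_name
  if PySem.Str.isIn "assigned" name || (PySem.Str.isIn "resolver" name || PySem.Str.isIn "owner" name) then some "resolver"
  else if PySem.Str.isIn "agent" name || PySem.Str.isIn "handler" name then some "agent"
  else if PySem.Str.isIn "category" name || PySem.Str.isIn "type" name then some "category"
  else if PySem.Str.isIn "status" name || PySem.Str.isIn "state" name then some "status"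
  else if PySem.Str.startswith dtype "float" || PySem.Str.startswith dtype "int" then
    if ["time", "hour", "duration", "days", "age"].any (fun key => PySem.Str.isIn key name) then some "duration"
    else if ["cost", "price", "amount", "revenue"].any (fun key => PySem.Str.isIn key name) then some "cost"
    else if ["count", "num", "tickets"].any (fun key => PySem.Str.isIn key name) then some "count"
    else none
  else none

-- ===== PORT B =====
-- B's rule table: (label, keywords, requires numeric dtype), in priority order
def pvRules : List (String × List String × Bool) :=
  [("resolver", ["assigned", "resolver", "owner"], false),
   ("agent", ["agent", "handler"], false),
   ("category", ["category", "type"], false),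
   ("status", ["status", "state"], false),
   ("duration", ["time", "hour", "duration", "days", "age"], true),
   ("cost", ["cost", "price", "amount", "revenue"], true),
   ("count", ["count", "num", "tickets"], true)]

-- keyword buckets by first character, as (keyword, priority) pairs (B's precomputed _BY_FIRST
-- table, written out; lookup of a missing key yields the empty bucket, = .get(ch, ()))
def pvBucket (c : Char) : List (String × Nat) :=
  if c = 'a' then [("assigned", 0), ("agent", 1), ("age", 4), ("amount", 5)]
  else if c = 'r' then [("resolver", 0), ("revenue", 5)]
  else if c = 'o' then [("owner", 0)]
  else if c = 'h' then [("handler", 1), ("hour", 4)]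
  else if c = 'c' then [("category", 2), ("cost", 5), ("count", 6)]
  else if c = 't' then [("type", 2), ("time", 4), ("tickets", 6)]
  else if c = 's' then [("status", 3), ("state", 3)]
  else if c = 'd' then [("duration", 4), ("days", 4)]
  else if c = 'p' then [("price", 5)]
  else if c = 'n' then [("num", 6)]
  else []

-- body of B's scan loop at one position: try only the bucket of the current character
-- (name.startswith(kw, i) is the prefix test on the suffix starting at i — exact)
def pvBestStep (c : Char) (suffix : List Char) (best : Nat) : Nat :=
  (pvBucket c).foldl
    (fun b kp => if kp.2 < b && PySem.Chars.startswith suffix kp.1.toList then kp.2 else b)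
    best

-- B's for-loop over enumerate(name): position i ↔ the suffix starting at i
def pvScan : List Char → Nat → Nat
  | [], best => best
  | c :: cs, best => pvScan cs (pvBestStep c (c :: cs) best)

def relationship_hint_py_alt (col_name : String) (dtype : String) : Option String :=
  let best := pvScan (PySem.Str.lower col_name).toList pvRules.length
  if best == pvRules.length then none
  else
    match pvRules[best]? with   -- Python's _RULES[best]; in range here since best < len(_RULES)
    | none => none
    | some (label, _, needs_numeric) =>
      if needs_numeric && !(PySem.Str.startswith dtype "float" || PySem.Str.startswith dtype "int") then none
      else some label

-- ===== PRECONDITION & SPEC =====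
def Spec_relationship_hint_py (col_name : String) (dtype : String) (out : Option String) : Prop := out = relationship_hint_py_alt col_name dtype
instance (col_name : String) (dtype : String) (out : Option String) : Decidable (Spec_relationship_hint_py col_name dtype out) := by unfold Spec_relationship_hint_py; infer_instance

-- ===== CLAIM (what is proved, stated in full; the proofs are below) =====
def Claim_equal_relationship_hint_py : Prop := ∀ (col_name : String) (dtype : String), Dom_relationship_hint_py col_name dtype → Spec_relationship_hint_py col_name dtype (relationship_hint_py col_name dtype)

-- ===== LEMMAS AND PROOFS =====

-- index of the first `true` (list length if none)
def pvFirstTrue : List Bool → Nat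
  | [] => 0
  | true :: _ => 0
  | false :: bs => pvFirstTrue bs + 1

-- per-rule "some keyword is a prefix of s" flags
def pvPrefB (s : List Char) : List Bool :=
  pvRules.map (fun r => r.2.1.any (fun kw => PySem.Chars.startswith s kw.toList))

-- per-rule "some keyword occurs in s" flags
def pvInfB (s : List Char) : List Bool :=
  pvRules.map (fun r => r.2.1.any (fun kw => PySem.Chars.isIn kw.toList s))

theorem pvFirstTrue_le_length : ∀ bs : List Bool, pvFirstTrue bs ≤ bs.length := by
  intro bs; induction bs with
  | nil => simp [pvFirstTrue]
  | cons b bs ih => cases b <;> simp [pvFirstTrue] <;> omega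

theorem pvFirstTrue_min_zip : ∀ (bs1 bs2 : List Bool), bs1.length = bs2.length →
    min (pvFirstTrue bs1) (pvFirstTrue bs2) = pvFirstTrue (List.zipWith or bs1 bs2) := by
  intro bs1
  induction bs1 with
  | nil => intro bs2 h; cases bs2 <;> simp_all [pvFirstTrue]
  | cons b bs ih =>
    intro bs2 h
    cases bs2 with
    | nil => simp at h
    | cons c cs =>
      simp only [List.length_cons, Nat.succ_inj] at h
      cases b <;> cases c <;>
        simp [pvFirstTrue, ← ih cs h, Nat.min_def] <;> split_ifs <;> omega

theorem pvSW (c k : Char) (cs ks : List Char) :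
    PySem.Chars.startswith (c :: cs) (k :: ks) = ((k == c) && PySem.Chars.startswith cs ks) := by
  simp [PySem.Chars.startswith, List.isPrefixOf]

theorem pvTL_age : "age".toList = ['a', 'g', 'e'] := rfl
theorem pvTL_agent : "agent".toList = ['a', 'g', 'e', 'n', 't'] := rfl
theorem pvTL_amount : "amount".toList = ['a', 'm', 'o', 'u', 'n', 't'] := rfl
theorem pvTL_assigned : "assigned".toList = ['a', 's', 's', 'i', 'g', 'n', 'e', 'd'] := rfl
theorem pvTL_category : "category".toList = ['c', 'a', 't', 'e', 'g', 'o', 'r', 'y'] := rfl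
theorem pvTL_cost : "cost".toList = ['c', 'o', 's', 't'] := rfl
theorem pvTL_count : "count".toList = ['c', 'o', 'u', 'n', 't'] := rfl
theorem pvTL_days : "days".toList = ['d', 'a', 'y', 's'] := rfl
theorem pvTL_duration : "duration".toList = ['d', 'u', 'r', 'a', 't', 'i', 'o', 'n'] := rfl
theorem pvTL_handler : "handler".toList = ['h', 'a', 'n', 'd', 'l', 'e', 'r'] := rfl
theorem pvTL_hour : "hour".toList = ['h', 'o', 'u', 'r'] := rfl
theorem pvTL_num : "num".toList = ['n', 'u', 'm'] := rfl
theorem pvTL_owner : "owner".toList = ['o', 'w', 'n', 'e', 'r'] := rfl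
theorem pvTL_price : "price".toList = ['p', 'r', 'i', 'c', 'e'] := rfl
theorem pvTL_resolver : "resolver".toList = ['r', 'e', 's', 'o', 'l', 'v', 'e', 'r'] := rfl
theorem pvTL_revenue : "revenue".toList = ['r', 'e', 'v', 'e', 'n', 'u', 'e'] := rfl
theorem pvTL_state : "state".toList = ['s', 't', 'a', 't', 'e'] := rfl
theorem pvTL_status : "status".toList = ['s', 't', 'a', 't', 'u', 's'] := rfl
theorem pvTL_tickets : "tickets".toList = ['t', 'i', 'c', 'k', 'e', 't', 's'] := rfl
theorem pvTL_time : "time".toList = ['t', 'i', 'm', 'e'] := rfl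
theorem pvTL_type : "type".toList = ['t', 'y', 'p', 'e'] := rfl

set_option maxHeartbeats 4000000 in
theorem pvBestStep_eq (c : Char) (cs : List Char) (best : Nat) (hb : best ≤ 7) :
    pvBestStep c (c :: cs) best = min best (pvFirstTrue (pvPrefB (c :: cs))) := by
  by_cases hca : c = 'a'
  · subst hca
    cases hx0 : PySem.Chars.startswith cs ['s', 's', 'i', 'g', 'n', 'e', 'd'] <;>
    cases hx1 : PySem.Chars.startswith cs ['g', 'e', 'n', 't'] <;>
    cases hx2 : PySem.Chars.startswith cs ['g', 'e'] <;>
    cases hx3 : PySem.Chars.startswith cs ['m', 'o', 'u', 'n', 't'] <;>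
    simp [pvBestStep, pvBucket, pvPrefB, pvRules, pvTL_age, pvTL_agent, pvTL_amount, pvTL_assigned, pvTL_category, pvTL_cost, pvTL_count, pvTL_days, pvTL_duration, pvTL_handler, pvTL_hour, pvTL_num, pvTL_owner, pvTL_price, pvTL_resolver, pvTL_revenue, pvTL_state, pvTL_status, pvTL_tickets, pvTL_time, pvTL_type, pvSW, pvFirstTrue,
      decide_eq_true_eq, hx0, hx1, hx2, hx3] <;>
    (try split_ifs) <;> omega
  by_cases hcr : c = 'r'
  · subst hcr
    cases hx0 : PySem.Chars.startswith cs ['e', 's', 'o', 'l', 'v', 'e', 'r'] <;>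
    cases hx1 : PySem.Chars.startswith cs ['e', 'v', 'e', 'n', 'u', 'e'] <;>
    simp [pvBestStep, pvBucket, pvPrefB, pvRules, pvTL_age, pvTL_agent, pvTL_amount, pvTL_assigned, pvTL_category, pvTL_cost, pvTL_count, pvTL_days, pvTL_duration, pvTL_handler, pvTL_hour, pvTL_num, pvTL_owner, pvTL_price, pvTL_resolver, pvTL_revenue, pvTL_state, pvTL_status, pvTL_tickets, pvTL_time, pvTL_type, pvSW, pvFirstTrue,
      decide_eq_true_eq, hx0, hx1] <;>
    (try split_ifs) <;> omega
  by_cases hco : c = 'o'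
  · subst hco
    cases hx0 : PySem.Chars.startswith cs ['w', 'n', 'e', 'r'] <;>
    simp [pvBestStep, pvBucket, pvPrefB, pvRules, pvTL_age, pvTL_agent, pvTL_amount, pvTL_assigned, pvTL_category, pvTL_cost, pvTL_count, pvTL_days, pvTL_duration, pvTL_handler, pvTL_hour, pvTL_num, pvTL_owner, pvTL_price, pvTL_resolver, pvTL_revenue, pvTL_state, pvTL_status, pvTL_tickets, pvTL_time, pvTL_type, pvSW, pvFirstTrue,
      decide_eq_true_eq, hx0] <;>
    (try split_ifs) <;> omega
  by_cases hch : c = 'h'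
  · subst hch
    cases hx0 : PySem.Chars.startswith cs ['a', 'n', 'd', 'l', 'e', 'r'] <;>
    cases hx1 : PySem.Chars.startswith cs ['o', 'u', 'r'] <;>
    simp [pvBestStep, pvBucket, pvPrefB, pvRules, pvTL_age, pvTL_agent, pvTL_amount, pvTL_assigned, pvTL_category, pvTL_cost, pvTL_count, pvTL_days, pvTL_duration, pvTL_handler, pvTL_hour, pvTL_num, pvTL_owner, pvTL_price, pvTL_resolver, pvTL_revenue, pvTL_state, pvTL_status, pvTL_tickets, pvTL_time, pvTL_type, pvSW, pvFirstTrue,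
      decide_eq_true_eq, hx0, hx1] <;>
    (try split_ifs) <;> omega
  by_cases hcc : c = 'c'
  · subst hcc
    cases hx0 : PySem.Chars.startswith cs ['a', 't', 'e', 'g', 'o', 'r', 'y'] <;>
    cases hx1 : PySem.Chars.startswith cs ['o', 's', 't'] <;>
    cases hx2 : PySem.Chars.startswith cs ['o', 'u', 'n', 't'] <;>
    simp [pvBestStep, pvBucket, pvPrefB, pvRules, pvTL_age, pvTL_agent, pvTL_amount, pvTL_assigned, pvTL_category, pvTL_cost, pvTL_count, pvTL_days, pvTL_duration, pvTL_handler, pvTL_hour, pvTL_num, pvTL_owner, pvTL_price, pvTL_resolver, pvTL_revenue, pvTL_state, pvTL_status, pvTL_tickets, pvTL_time, pvTL_type, pvSW, pvFirstTrue,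
      decide_eq_true_eq, hx0, hx1, hx2] <;>
    (try split_ifs) <;> omega
  by_cases hct : c = 't'
  · subst hct
    cases hx0 : PySem.Chars.startswith cs ['y', 'p', 'e'] <;>
    cases hx1 : PySem.Chars.startswith cs ['i', 'm', 'e'] <;>
    cases hx2 : PySem.Chars.startswith cs ['i', 'c', 'k', 'e', 't', 's'] <;>
    simp [pvBestStep, pvBucket, pvPrefB, pvRules, pvTL_age, pvTL_agent, pvTL_amount, pvTL_assigned, pvTL_category, pvTL_cost, pvTL_count, pvTL_days, pvTL_duration, pvTL_handler, pvTL_hour, pvTL_num, pvTL_owner, pvTL_price, pvTL_resolver, pvTL_revenue, pvTL_state, pvTL_status, pvTL_tickets, pvTL_time, pvTL_type, pvSW, pvFirstTrue,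
      decide_eq_true_eq, hx0, hx1, hx2] <;>
    (try split_ifs) <;> omega
  by_cases hcs : c = 's'
  · subst hcs
    cases hx0 : PySem.Chars.startswith cs ['t', 'a', 't', 'u', 's'] <;>
    cases hx1 : PySem.Chars.startswith cs ['t', 'a', 't', 'e'] <;>
    simp [pvBestStep, pvBucket, pvPrefB, pvRules, pvTL_age, pvTL_agent, pvTL_amount, pvTL_assigned, pvTL_category, pvTL_cost, pvTL_count, pvTL_days, pvTL_duration, pvTL_handler, pvTL_hour, pvTL_num, pvTL_owner, pvTL_price, pvTL_resolver, pvTL_revenue, pvTL_state, pvTL_status, pvTL_tickets, pvTL_time, pvTL_type, pvSW, pvFirstTrue,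
      decide_eq_true_eq, hx0, hx1] <;>
    (try split_ifs) <;> omega
  by_cases hcd : c = 'd'
  · subst hcd
    cases hx0 : PySem.Chars.startswith cs ['u', 'r', 'a', 't', 'i', 'o', 'n'] <;>
    cases hx1 : PySem.Chars.startswith cs ['a', 'y', 's'] <;>
    simp [pvBestStep, pvBucket, pvPrefB, pvRules, pvTL_age, pvTL_agent, pvTL_amount, pvTL_assigned, pvTL_category, pvTL_cost, pvTL_count, pvTL_days, pvTL_duration, pvTL_handler, pvTL_hour, pvTL_num, pvTL_owner, pvTL_price, pvTL_resolver, pvTL_revenue, pvTL_state, pvTL_status, pvTL_tickets, pvTL_time, pvTL_type, pvSW, pvFirstTrue,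
      decide_eq_true_eq, hx0, hx1] <;>
    (try split_ifs) <;> omega
  by_cases hcp : c = 'p'
  · subst hcp
    cases hx0 : PySem.Chars.startswith cs ['r', 'i', 'c', 'e'] <;>
    simp [pvBestStep, pvBucket, pvPrefB, pvRules, pvTL_age, pvTL_agent, pvTL_amount, pvTL_assigned, pvTL_category, pvTL_cost, pvTL_count, pvTL_days, pvTL_duration, pvTL_handler, pvTL_hour, pvTL_num, pvTL_owner, pvTL_price, pvTL_resolver, pvTL_revenue, pvTL_state, pvTL_status, pvTL_tickets, pvTL_time, pvTL_type, pvSW, pvFirstTrue,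
      decide_eq_true_eq, hx0] <;>
    (try split_ifs) <;> omega
  by_cases hcn : c = 'n'
  · subst hcn
    cases hx0 : PySem.Chars.startswith cs ['u', 'm'] <;>
    simp [pvBestStep, pvBucket, pvPrefB, pvRules, pvTL_age, pvTL_agent, pvTL_amount, pvTL_assigned, pvTL_category, pvTL_cost, pvTL_count, pvTL_days, pvTL_duration, pvTL_handler, pvTL_hour, pvTL_num, pvTL_owner, pvTL_price, pvTL_resolver, pvTL_revenue, pvTL_state, pvTL_status, pvTL_tickets, pvTL_time, pvTL_type, pvSW, pvFirstTrue,
      decide_eq_true_eq, hx0] <;>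
    (try split_ifs) <;> omega
  · have ea : (('a' : Char) == c) = false := beq_eq_false_iff_ne.mpr (Ne.symm hca)
    have er : (('r' : Char) == c) = false := beq_eq_false_iff_ne.mpr (Ne.symm hcr)
    have eo : (('o' : Char) == c) = false := beq_eq_false_iff_ne.mpr (Ne.symm hco)
    have eh : (('h' : Char) == c) = false := beq_eq_false_iff_ne.mpr (Ne.symm hch)
    have ec : (('c' : Char) == c) = false := beq_eq_false_iff_ne.mpr (Ne.symm hcc)
    have et : (('t' : Char) == c) = false := beq_eq_false_iff_ne.mpr (Ne.symm hct)
    have es : (('s' : Char) == c) = false := beq_eq_false_iff_ne.mpr (Ne.symm hcs)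
    have ed : (('d' : Char) == c) = false := beq_eq_false_iff_ne.mpr (Ne.symm hcd)
    have ep : (('p' : Char) == c) = false := beq_eq_false_iff_ne.mpr (Ne.symm hcp)
    have en : (('n' : Char) == c) = false := beq_eq_false_iff_ne.mpr (Ne.symm hcn)
    simp [pvBestStep, pvBucket, pvPrefB, pvRules, pvTL_age, pvTL_agent, pvTL_amount, pvTL_assigned, pvTL_category, pvTL_cost, pvTL_count, pvTL_days, pvTL_duration, pvTL_handler, pvTL_hour, pvTL_num, pvTL_owner, pvTL_price, pvTL_resolver, pvTL_revenue, pvTL_state, pvTL_status, pvTL_tickets, pvTL_time, pvTL_type, pvSW, pvFirstTrue,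
      hca, hcr, hco, hch, hcc, hct, hcs, hcd, hcp, hcn, ea, er, eo, eh, ec, et, es, ed, ep, en] <;>
    omega

theorem pvAny_isIn_cons (c : Char) (cs : List Char) : ∀ kws : List String,
    kws.any (fun kw => PySem.Chars.isIn kw.toList (c :: cs)) =
      (kws.any (fun kw => PySem.Chars.startswith (c :: cs) kw.toList) ||
       kws.any (fun kw => PySem.Chars.isIn kw.toList cs)) := by
  intro kws
  induction kws with
  | nil => simp
  | cons k ks ih =>
    have hk : PySem.Chars.isIn k.toList (c :: cs) =
        (PySem.Chars.startswith (c :: cs) k.toList || PySem.Chars.isIn k.toList cs) := by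
      by_cases h : k.toList <:+: (c :: cs)
      · rcases (List.infix_cons_iff.mp h) with hp | hi
        · simp [(PySem.Chars.isIn_iff_infix _ _).mpr h, (PySem.Chars.startswith_iff _ _).mpr hp]
        · simp [(PySem.Chars.isIn_iff_infix _ _).mpr h, (PySem.Chars.isIn_iff_infix _ _).mpr hi]
      · have h1 : PySem.Chars.isIn k.toList (c :: cs) = false := (PySem.Chars.isIn_eq_false_iff _ _).mpr h
        have h2 : PySem.Chars.isIn k.toList cs = false :=
          (PySem.Chars.isIn_eq_false_iff _ _).mpr (fun hi => h (hi.trans (List.suffix_cons c cs).isInfix))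
        have h3 : PySem.Chars.startswith (c :: cs) k.toList = false := by
          cases hs : PySem.Chars.startswith (c :: cs) k.toList
          · rfl
          · exact absurd ((PySem.Chars.startswith_iff _ _).mp hs).isInfix h
        simp [h1, h2, h3]
    simp only [List.any_cons, hk, ih]
    cases PySem.Chars.startswith (c :: cs) k.toList <;> cases PySem.Chars.isIn k.toList cs <;> simp

theorem pvInfB_cons (c : Char) (cs : List Char) :
    pvInfB (c :: cs) = List.zipWith or (pvPrefB (c :: cs)) (pvInfB cs) := by
  simp only [pvInfB, pvPrefB, pvRules, List.map_cons, List.map_nil, List.zipWith,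
    pvAny_isIn_cons]

theorem pvScan_eq : ∀ (cs : List Char) (best : Nat), best ≤ 7 →
    pvScan cs best = min best (pvFirstTrue (pvInfB cs)) := by
  intro cs
  induction cs with
  | nil =>
    intro best hb
    have : pvFirstTrue (pvInfB []) = 7 := by decide
    simp [pvScan, this]; omega
  | cons c cs ih =>
    intro best hb
    have hstep := pvBestStep_eq c cs best hb
    have hle : pvBestStep c (c :: cs) best ≤ 7 := by rw [hstep]; omega
    have hlen : (pvPrefB (c :: cs)).length = (pvInfB cs).length := by
      simp [pvPrefB, pvInfB]
    calc pvScan (c :: cs) best = pvScan cs (pvBestStep c (c :: cs) best) := rfl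
      _ = min (pvBestStep c (c :: cs) best) (pvFirstTrue (pvInfB cs)) := ih _ hle
      _ = min (min best (pvFirstTrue (pvPrefB (c :: cs)))) (pvFirstTrue (pvInfB cs)) := by rw [hstep]
      _ = min best (min (pvFirstTrue (pvPrefB (c :: cs))) (pvFirstTrue (pvInfB cs))) := Nat.min_assoc _ _ _
      _ = min best (pvFirstTrue (List.zipWith or (pvPrefB (c :: cs)) (pvInfB cs))) := by
            rw [pvFirstTrue_min_zip _ _ hlen]
      _ = min best (pvFirstTrue (pvInfB (c :: cs))) := by rw [pvInfB_cons]

set_option maxHeartbeats 2000000 in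
theorem pvMain (nl : List Char) (num : Bool) :
    (if PySem.Chars.isIn "assigned".toList nl || (PySem.Chars.isIn "resolver".toList nl || PySem.Chars.isIn "owner".toList nl) then some "resolver"
     else if PySem.Chars.isIn "agent".toList nl || PySem.Chars.isIn "handler".toList nl then some "agent"
     else if PySem.Chars.isIn "category".toList nl || PySem.Chars.isIn "type".toList nl then some "category"
     else if PySem.Chars.isIn "status".toList nl || PySem.Chars.isIn "state".toList nl then some "status"
     else if num then
       if (["time", "hour", "duration", "days", "age"] : List String).any (fun key => PySem.Chars.isIn key.toList nl) then some "duration"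
       else if (["cost", "price", "amount", "revenue"] : List String).any (fun key => PySem.Chars.isIn key.toList nl) then some "cost"
       else if (["count", "num", "tickets"] : List String).any (fun key => PySem.Chars.isIn key.toList nl) then some "count"
       else none
     else none)
    = (if pvFirstTrue (pvInfB nl) == 7 then (none : Option String)
       else match pvRules[pvFirstTrue (pvInfB nl)]? with
            | none => none
            | some (label, _, needs_numeric) =>
              if needs_numeric && !num then none else some label) := by
  cases h0 : (["assigned", "resolver", "owner"] : List String).any (fun kw => PySem.Chars.isIn kw.toList nl) <;>
  cases h1 : (["agent", "handler"] : List String).any (fun kw => PySem.Chars.isIn kw.toList nl) <;>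
  cases h2 : (["category", "type"] : List String).any (fun kw => PySem.Chars.isIn kw.toList nl) <;>
  cases h3 : (["status", "state"] : List String).any (fun kw => PySem.Chars.isIn kw.toList nl) <;>
  cases h4 : (["time", "hour", "duration", "days", "age"] : List String).any (fun kw => PySem.Chars.isIn kw.toList nl) <;>
  cases h5 : (["cost", "price", "amount", "revenue"] : List String).any (fun kw => PySem.Chars.isIn kw.toList nl) <;>
  cases h6 : (["count", "num", "tickets"] : List String).any (fun kw => PySem.Chars.isIn kw.toList nl) <;>
  cases num <;>
    (have h0' := h0; have h1' := h1; have h2' := h2; have h3' := h3;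
     simp only [List.any_cons, List.any_nil, Bool.or_false] at h0' h1' h2' h3';
     simp only [pvInfB, pvRules, List.map_cons, List.map_nil, h0, h1, h2, h3, h4, h5, h6,
       h0', h1', h2', h3', pvFirstTrue, Bool.and_true, Bool.and_false, Bool.not_true,
       Bool.not_false, Bool.false_eq_true, Bool.true_eq_false, if_true, if_false] <;>
     decide)

-- ===== VERDICT (by name: the statement is the Claim_ definition above) =====
theorem relationship_hint_py_spec : Claim_equal_relationship_hint_py := by
  intro col_name dtype _
  unfold Spec_relationship_hint_py relationship_hint_py relationship_hint_py_alt
  have hle : pvFirstTrue (pvInfB (PySem.Str.lower col_name).toList) ≤ 7 := by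
    have := pvFirstTrue_le_length (pvInfB (PySem.Str.lower col_name).toList)
    simpa [pvInfB, pvRules] using this
  have hscan : pvScan (PySem.Str.lower col_name).toList pvRules.length
      = pvFirstTrue (pvInfB (PySem.Str.lower col_name).toList) := by
    show pvScan (PySem.Str.lower col_name).toList 7 = _
    rw [pvScan_eq _ 7 (by omega), Nat.min_eq_right hle]
  simp only [hscan, PySem.Str.isIn_eq]
  exact pvMain (PySem.Str.lower col_name).toList
    (PySem.Str.startswith dtype "float" || PySem.Str.startswith dtype "int")
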